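-- pv_equiv track=rewrite | github.com/dpvyt15/RRAM-FPCA | Datasets/BP_InMem2.py | PadIt
-- ===== SOURCE A (Python) =====
-- def PadIt(In,ker):
-- 	x,y=len(ker),len(ker[0])
-- 	x1,y1=len(In),len(In[0])
--
-- 	Out=[[0 for i in range(y1+2*y)] for j in range(x1+2*x)]
--
-- 	for i in range(x,x1+x):
-- 		for j in range(y, y1+y):
-- 			Out[i][j]=In[i-x][j-y]
-- 	return Out
-- ===== SOURCE B (Python) =====
-- def PadIt(In, ker):
--     x, y = len(ker), len(ker[0])
--     x1, y1 = len(In), len(In[0])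
--     top = [[0] * (y1 + 2 * y) for _ in range(x)]
--     mid = [[0] * y + row[:y1] + [0] * y for row in In]
--     bot = [[0] * (y1 + 2 * y) for _ in range(x)]
--     return top + mid + bot
-- ===== Notes on version B (the rewrite author's own statement) =====
-- stated objective: simpler
-- what changed: B assembles the padded matrix directly by concatenating x zero rows, one padded row per input row ([0]*y + row[:y1] + [0]*y), and x zero rows, instead of pre-allocating a zero matrix and overwriting its interior with an offset-indexed double copy loop.
import Mathlib
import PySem

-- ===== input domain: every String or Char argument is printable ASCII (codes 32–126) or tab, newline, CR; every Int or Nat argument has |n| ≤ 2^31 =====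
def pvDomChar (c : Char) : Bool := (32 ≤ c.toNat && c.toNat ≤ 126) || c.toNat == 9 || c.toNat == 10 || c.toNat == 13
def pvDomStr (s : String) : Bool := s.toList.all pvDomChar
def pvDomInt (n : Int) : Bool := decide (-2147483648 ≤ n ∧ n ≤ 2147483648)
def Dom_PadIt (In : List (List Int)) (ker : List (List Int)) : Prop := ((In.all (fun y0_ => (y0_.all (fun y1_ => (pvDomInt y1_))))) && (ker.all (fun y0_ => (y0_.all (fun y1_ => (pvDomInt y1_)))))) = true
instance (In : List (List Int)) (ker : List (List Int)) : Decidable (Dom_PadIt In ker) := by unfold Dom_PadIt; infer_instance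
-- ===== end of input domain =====

-- B assembles the padded matrix by concatenating zero rows and per-row padded rows instead of
-- pre-allocating a zero matrix and overwriting its interior with an offset-index copy loop (objective: simpler).

-- ===== PORT A =====
-- Out[i][j] = v for the loop's indices i, j, which are nonnegative and in range on every
-- input Pre_PadIt admits; List.set/List.getD are exact Python indexing there.
def pvSet2 (m : List (List Int)) (i j : Int) (v : Int) : List (List Int) :=
  m.set i.toNat ((m.getD i.toNat []).set j.toNat v)

-- ker[0] / In[0] are pyGet?; Pre_PadIt excludes the empty lists, where Python raises IndexError.
-- In[i-x][j-y] is pyGetD with default 0: exact inside Pre_PadIt, where both indices are in range.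
def PadIt (In : List (List Int)) (ker : List (List Int)) : List (List Int) :=
  let x : Int := ker.length
  let y : Int := ((PySem.List.pyGet? ker 0).getD []).length
  let x1 : Int := In.length
  let y1 : Int := ((PySem.List.pyGet? In 0).getD []).length
  let Out := (PySem.List.pyRange 0 (x1 + 2*x) 1).map (fun _ =>
    (PySem.List.pyRange 0 (y1 + 2*y) 1).map (fun _ => (0 : Int)))
  (PySem.List.pyRange x (x1 + x) 1).foldl (fun O i =>
    (PySem.List.pyRange y (y1 + y) 1).foldl (fun O2 j =>
      pvSet2 O2 i j (PySem.List.pyGetD (PySem.List.pyGetD In (i - x) []) (j - y) 0)) O) Out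

-- ===== PORT B =====
-- row[:y1] is PySem.List.slice (exact Python slicing).
def PadIt_alt (In : List (List Int)) (ker : List (List Int)) : List (List Int) :=
  let x : Int := ker.length
  let y : Int := ((PySem.List.pyGet? ker 0).getD []).length
  let y1 : Int := ((PySem.List.pyGet? In 0).getD []).length
  let top := List.replicate x.toNat (List.replicate (y1 + 2*y).toNat (0 : Int))
  let mid := In.map (fun r => List.replicate y.toNat (0 : Int) ++ PySem.List.slice r none (some y1) ++ List.replicate y.toNat (0 : Int))
  let bot := List.replicate x.toNat (List.replicate (y1 + 2*y).toNat (0 : Int))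
  top ++ mid ++ bot

-- ===== PRECONDITION & SPEC =====
-- Pre_ excludes exactly the inputs on which A raises IndexError: empty In or ker (len(ker[0]) /
-- len(In[0])), or a row of In shorter than In[0] (the copy loop reads len(In[0]) entries of every row).
def Pre_PadIt (In : List (List Int)) (ker : List (List Int)) : Prop :=
  In ≠ [] ∧ ker ≠ [] ∧ ∀ r ∈ In, (In.headD []).length ≤ r.length
instance (In : List (List Int)) (ker : List (List Int)) : Decidable (Pre_PadIt In ker) := by
  unfold Pre_PadIt; infer_instance
def pvWitness_PadIt : List (List Int) × List (List Int) := ([[1, 2], [3, 4]], [[5]])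
def Spec_PadIt (In : List (List Int)) (ker : List (List Int)) (out : List (List Int)) : Prop := out = PadIt_alt In ker
instance (In : List (List Int)) (ker : List (List Int)) (out : List (List Int)) : Decidable (Spec_PadIt In ker out) := by unfold Spec_PadIt; infer_instance

-- ===== CLAIM (what is proved, stated in full; the proofs are below) =====
def Claim_equal_PadIt : Prop := ∀ (In : List (List Int)) (ker : List (List Int)), Dom_PadIt In ker → Pre_PadIt In ker → Spec_PadIt In ker (PadIt In ker)

-- ===== LEMMAS AND PROOFS =====

-- Inner loop of A: overwriting the middle zeros of pre ++ 0^|r| ++ post with r, cell by cell.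
theorem pv_inner (r : List Int) : ∀ (pre post : List Int) (y : Int), 0 ≤ y → pre.length = y.toNat →
    (PySem.List.pyRange y (y + r.length) 1).foldl
      (fun acc j => acc.set j.toNat (PySem.List.pyGetD r (j - y) 0))
      (pre ++ (List.replicate r.length 0 ++ post))
    = pre ++ (r ++ post) := by
  induction r with
  | nil =>
    intro pre post y hy hlen
    simp [PySem.List.pyRange_one_eq_nil (le_refl y)]
  | cons a r ih =>
    intro pre post y hy hlen
    have hcons : PySem.List.pyRange y (y + (a :: r).length) 1
        = y :: PySem.List.pyRange (y+1) (y + (a :: r).length) 1 :=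
      PySem.List.pyRange_one_cons (by simp)
    rw [hcons]
    simp only [List.foldl_cons]
    have hstep : (pre ++ (List.replicate (a :: r).length 0 ++ post)).set y.toNat
        (PySem.List.pyGetD (a :: r) (y - y) 0)
        = (pre ++ [a]) ++ (List.replicate r.length 0 ++ post) := by
      have h0 : y - y = (0 : Int) := by ring
      rw [h0, PySem.List.pyGetD_zero_cons]
      rw [List.set_append]
      simp [hlen, List.replicate_succ]
    rw [hstep]
    have hrange : y + ((a :: r).length : Int) = (y + 1) + r.length := by
      simp; ring
    rw [hrange]
    have hcongr : (PySem.List.pyRange (y+1) ((y+1) + r.length) 1).foldl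
        (fun acc j => acc.set j.toNat (PySem.List.pyGetD (a :: r) (j - y) 0))
        ((pre ++ [a]) ++ (List.replicate r.length 0 ++ post))
      = (PySem.List.pyRange (y+1) ((y+1) + r.length) 1).foldl
        (fun acc j => acc.set j.toNat (PySem.List.pyGetD r (j - (y+1)) 0))
        ((pre ++ [a]) ++ (List.replicate r.length 0 ++ post)) := by
      apply PySem.List.foldl_congr_mem
      intro acc j hj
      have hb := (PySem.List.mem_pyRange_one).1 hj
      have h1 : 0 ≤ j - (y+1) := by omega
      have h2 : j - y = (j - (y+1)) + 1 := by ring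
      congr 1
      rw [h2]
      obtain ⟨k, hk⟩ : ∃ k : Nat, j - (y+1) = (k : Int) := ⟨(j-(y+1)).toNat, by omega⟩
      have hk1 : (k : Int) + 1 = ((k+1 : Nat) : Int) := by push_cast; ring
      rw [hk, hk1, PySem.List.pyGetD_natCast, PySem.List.pyGetD_natCast]
      simp [List.getD]
    rw [hcongr, ih (pre ++ [a]) post (y+1) (by omega) (by simp [hlen]; omega)]
    simp

-- One step of A's outer loop rewrites only row i.
theorem pv_row_set (f : Int → Int) (js : List Int) : ∀ (Out : List (List Int)) (i : Int),
    i.toNat < Out.length →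
    js.foldl (fun O j => pvSet2 O i j (f j)) Out
    = Out.set i.toNat (js.foldl (fun row j => row.set j.toNat (f j)) (Out.getD i.toNat [])) := by
  induction js with
  | nil =>
    intro Out i h
    simp only [List.foldl_nil]
    rw [List.getD_eq_getElem _ _ h, List.set_getElem_self]
  | cons j js ih =>
    intro Out i h
    simp only [List.foldl_cons]
    rw [ih _ i (by simp [pvSet2, h])]
    unfold pvSet2
    rw [List.set_set]
    congr 1
    rw [List.getD_eq_getElem?_getD, List.getElem?_eq_getElem (by simpa using h)]
    simp [List.getElem_set_self]

-- A's outer loop turns the block of zero rows between pre and post into the padded input rows.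
theorem pv_outer (w : Nat) (yn : Nat) (M : List (List Int)) :
    ∀ (pre post : List (List Int)) (x : Int), 0 ≤ x → pre.length = x.toNat →
    (∀ r ∈ M, w ≤ r.length) →
    (PySem.List.pyRange x (x + M.length) 1).foldl
      (fun O i => (PySem.List.pyRange (yn : Int) ((yn : Int) + w) 1).foldl
         (fun O2 j => pvSet2 O2 i j (PySem.List.pyGetD (PySem.List.pyGetD M (i - x) []) (j - (yn : Int)) 0)) O)
      (pre ++ (List.replicate M.length (List.replicate (w + 2*yn) 0) ++ post))
    = pre ++ (M.map (fun r => List.replicate yn 0 ++ (r.take w ++ List.replicate yn 0)) ++ post) := by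
  have hy : (0:Int) ≤ (yn : Int) := by positivity
  induction M with
  | nil =>
    intro pre post x hx hlen hrect
    simp
  | cons m M ih =>
    intro pre post x hx hlen hrect
    have hm : w ≤ m.length := hrect m (by simp)
    have htk : (m.take w).length = w := by simp [hm]
    have hcons : PySem.List.pyRange x (x + ((m :: M).length : Int)) 1
        = x :: PySem.List.pyRange (x+1) (x + ((m :: M).length : Int)) 1 :=
      PySem.List.pyRange_one_cons (by simp only [List.length_cons]; push_cast; omega)
    rw [hcons]
    simp only [List.foldl_cons]
    -- first iteration rewrites row x
    set Out0 := pre ++ (List.replicate (m :: M).length (List.replicate (w + 2*yn) 0) ++ post) with hOut0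
    have hxlt : x.toNat < Out0.length := by simp [hOut0, hlen]
    have hrow : Out0.getD x.toNat [] = List.replicate (w + 2*yn) 0 := by
      rw [List.getD_eq_getElem?_getD, hOut0, List.getElem?_append_right (by omega)]
      simp [hlen]
    have hstep : (PySem.List.pyRange (yn:Int) ((yn:Int) + w) 1).foldl
        (fun O2 j => pvSet2 O2 x j (PySem.List.pyGetD (PySem.List.pyGetD (m :: M) (x - x) []) (j - (yn:Int)) 0)) Out0
        = (pre ++ [List.replicate yn 0 ++ (m.take w ++ List.replicate yn 0)])
            ++ (List.replicate M.length (List.replicate (w + 2*yn) 0) ++ post) := by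
      have hx0 : x - x = (0 : Int) := by ring
      have hsplit : List.replicate (w + 2*yn) (0 : Int)
          = List.replicate yn 0 ++ (List.replicate (m.take w).length 0 ++ List.replicate yn 0) := by
        rw [← List.replicate_add, ← List.replicate_add, htk]
        congr 1
        omega
      have hfold : (PySem.List.pyRange (yn:Int) ((yn:Int) + w) 1).foldl
          (fun row j => row.set j.toNat (PySem.List.pyGetD m (j - (yn:Int)) 0))
          (List.replicate (w + 2*yn) 0)
          = List.replicate yn 0 ++ (m.take w ++ List.replicate yn 0) := by
        have hcg : (PySem.List.pyRange (yn:Int) ((yn:Int) + w) 1).foldl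
            (fun row j => row.set j.toNat (PySem.List.pyGetD m (j - (yn:Int)) 0))
            (List.replicate (w + 2*yn) 0)
          = (PySem.List.pyRange (yn:Int) ((yn:Int) + w) 1).foldl
            (fun row j => row.set j.toNat (PySem.List.pyGetD (m.take w) (j - (yn:Int)) 0))
            (List.replicate (w + 2*yn) 0) := by
          apply PySem.List.foldl_congr_mem
          intro acc j hj
          have hb := (PySem.List.mem_pyRange_one).1 hj
          congr 1
          rw [PySem.List.pyGetD_eq_getElem m 0 (by omega) (by omega),
              PySem.List.pyGetD_eq_getElem (m.take w) 0 (by omega) (by push_cast [htk]; omega)]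
          exact (List.getElem_take).symm
        have hw : (yn:Int) + (w : Int) = (yn:Int) + ((m.take w).length : Int) := by rw [htk]
        rw [hcg, hsplit, hw]
        exact pv_inner (m.take w) _ _ (yn:Int) hy (by simp)
      rw [pv_row_set _ _ _ _ hxlt, hrow, hx0]
      simp only [PySem.List.pyGetD_zero_cons]
      rw [hfold, hOut0, List.set_append]
      simp [hlen, List.replicate_succ]
    rw [hstep]
    have hrange : x + (((m :: M).length : Nat) : Int) = (x + 1) + M.length := by
      simp; ring
    rw [hrange]
    have hcongr : ∀ O, (PySem.List.pyRange (x+1) ((x+1) + (M.length : Int)) 1).foldl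
        (fun O i => (PySem.List.pyRange (yn:Int) ((yn:Int) + w) 1).foldl
          (fun O2 j => pvSet2 O2 i j (PySem.List.pyGetD (PySem.List.pyGetD (m :: M) (i - x) []) (j - (yn:Int)) 0)) O) O
      = (PySem.List.pyRange (x+1) ((x+1) + (M.length : Int)) 1).foldl
        (fun O i => (PySem.List.pyRange (yn:Int) ((yn:Int) + w) 1).foldl
          (fun O2 j => pvSet2 O2 i j (PySem.List.pyGetD (PySem.List.pyGetD M (i - (x+1)) []) (j - (yn:Int)) 0)) O) O := by
      intro O
      apply PySem.List.foldl_congr_mem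
      intro acc i hi
      have hb := (PySem.List.mem_pyRange_one).1 hi
      obtain ⟨k, hk⟩ : ∃ k : Nat, i - (x+1) = (k : Int) := ⟨(i-(x+1)).toNat, by omega⟩
      have hk1 : i - x = ((k+1 : Nat) : Int) := by push_cast; omega
      rw [hk, hk1, PySem.List.pyGetD_natCast, PySem.List.pyGetD_natCast]
      simp [List.getD]
    rw [hcongr]
    rw [ih _ post (x+1) (by omega) (by simp [hlen]; omega)
        (fun r hr => hrect r (by simp [hr]))]
    simp

theorem pv_spec_main (In ker : List (List Int)) (hIn : In ≠ []) (hker : ker ≠ [])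
    (hrect : ∀ r ∈ In, (In.headD []).length ≤ r.length) :
    PadIt In ker = PadIt_alt In ker := by
  rcases In with _ | ⟨i0, In'⟩
  · exact absurd rfl hIn
  rcases ker with _ | ⟨k0, ker'⟩
  · exact absurd rfl hker
  unfold PadIt PadIt_alt
  simp only [PySem.List.pyGet?_zero_cons, Option.getD_some]
  set w : Nat := i0.length with hw
  set yk : Nat := k0.length with hyk
  set xk : Nat := (k0 :: ker').length with hxk
  set x1 : Nat := (i0 :: In').length with hx1
  -- the initial Out is a replicate of zero rows
  have hzrow : (PySem.List.pyRange 0 ((w : Int) + 2*(yk : Int)) 1).map (fun _ => (0:Int))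
      = List.replicate (w + 2*yk) 0 := by
    rw [List.map_const']
    congr 1
    rw [PySem.List.length_pyRange_one]
    omega
  have hOut : (PySem.List.pyRange 0 ((x1 : Int) + 2*(xk : Int)) 1).map
        (fun _ => (PySem.List.pyRange 0 ((w : Int) + 2*(yk : Int)) 1).map (fun _ => (0:Int)))
      = List.replicate xk (List.replicate (w + 2*yk) 0)
        ++ (List.replicate x1 (List.replicate (w + 2*yk) 0)
            ++ List.replicate xk (List.replicate (w + 2*yk) 0)) := by
    rw [List.map_const', hzrow, ← List.replicate_add, ← List.replicate_add]
    congr 1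
    rw [PySem.List.length_pyRange_one]
    omega
  rw [hOut]
  have hb1 : (x1 : Int) + (xk : Int) = (xk : Int) + ((i0 :: In').length : Nat) := by
    push_cast [hx1]; ring
  have hb2 : (w : Int) + (yk : Int) = (yk : Int) + (w : Int) := by ring
  rw [hb1, hb2]
  rw [pv_outer w yk (i0 :: In')
        (List.replicate xk (List.replicate (w + 2*yk) 0))
        (List.replicate xk (List.replicate (w + 2*yk) 0))
        (xk : Int) (by positivity) (by simp)
        (by intro r hr; simpa [hw] using hrect r hr)]
  have h3 : ((w:Int) + 2*(yk:Int)).toNat = w + 2*yk := by omega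
  rw [h3]
  simp [List.append_assoc, PySem.List.slice_to_natCast]

-- ===== VERDICT (by name: the statement is the Claim_ definition above) =====
theorem PadIt_spec : Claim_equal_PadIt := by
  intro In ker _ hpre
  unfold Spec_PadIt
  exact pv_spec_main In ker hpre.1 hpre.2.1 hpre.2.2
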